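-- pv_equiv track=rewrite | github.com/sjansenmesh/aoc24 | day_7/day_7_pt_1.py | recursive_operate
-- ===== SOURCE A (Python) =====
-- def recursive_operate(results, numbers):
--     new_results = []
--     y = numbers[0]
--     numbers = numbers[1:]
--     for x in results:
--         add = x + y
--         new_results.append(add)
--         multiply = x * y
--         new_results.append(multiply)
--     if len(numbers) > 0:
--         return recursive_operate(new_results, numbers)
--     else:
--         return new_results
-- ===== SOURCE B (Python) =====
-- def recursive_operate(results, numbers):
--     for y in numbers:
--         results = [v for x in results for v in (x + y, x * y)]
--     return results
-- ===== Notes on version B (the rewrite author's own statement) =====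
-- stated objective: idiomatic
-- what changed: Replaces the recursion-with-manual-appends by a single iterative loop that rebuilds the list with a flat comprehension per number; Pre_ excludes empty numbers, where A raises IndexError reading numbers[0].
import Mathlib
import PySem

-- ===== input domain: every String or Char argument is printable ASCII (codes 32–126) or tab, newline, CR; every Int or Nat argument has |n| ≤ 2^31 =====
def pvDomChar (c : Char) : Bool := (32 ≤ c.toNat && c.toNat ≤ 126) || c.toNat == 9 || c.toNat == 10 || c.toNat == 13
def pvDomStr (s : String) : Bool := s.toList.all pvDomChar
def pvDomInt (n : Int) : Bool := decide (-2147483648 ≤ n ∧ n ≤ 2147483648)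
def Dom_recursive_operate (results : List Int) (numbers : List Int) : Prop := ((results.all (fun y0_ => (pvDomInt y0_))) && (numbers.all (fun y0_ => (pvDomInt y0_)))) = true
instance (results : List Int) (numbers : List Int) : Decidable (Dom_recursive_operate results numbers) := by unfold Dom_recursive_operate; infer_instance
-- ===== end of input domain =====

-- B replaces A's recursion-with-manual-appends by one iterative loop with a flat
-- comprehension per number (objective: idiomatic); equal return values wherever A returns.

-- ===== PORT A =====
def recursive_operate (results : List Int) (numbers : List Int) : List Int :=
  match numbers with
  | [] => []          -- Python: numbers[0] raises IndexError here; excluded by Pre_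
  | y :: rest =>
    -- numbers = numbers[1:] is 'rest'; the for-loop appends x+y then x*y
    let new_results := results.foldl (fun acc x => acc ++ [x + y] ++ [x * y]) []
    if rest.length > 0 then recursive_operate new_results rest else new_results

-- ===== PORT B =====
def recursive_operate_alt (results : List Int) (numbers : List Int) : List Int :=
  numbers.foldl (fun res y => res.flatMap (fun x => [x + y, x * y])) results

-- ===== PRECONDITION & SPEC =====
-- A reads numbers[0] unconditionally, so it raises IndexError on empty numbers.
def Pre_recursive_operate (results : List Int) (numbers : List Int) : Prop := numbers ≠ []
instance (results : List Int) (numbers : List Int) : Decidable (Pre_recursive_operate results numbers) := by unfold Pre_recursive_operate; infer_instance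
def pvWitness_recursive_operate : List Int × List Int := ([1, 2], [3])

def Spec_recursive_operate (results : List Int) (numbers : List Int) (out : List Int) : Prop := out = recursive_operate_alt results numbers
instance (results : List Int) (numbers : List Int) (out : List Int) : Decidable (Spec_recursive_operate results numbers out) := by unfold Spec_recursive_operate; infer_instance

-- ===== CLAIM (what is proved, stated in full; the proofs are below) =====
def Claim_equal_recursive_operate : Prop := ∀ (results : List Int) (numbers : List Int), Dom_recursive_operate results numbers → Pre_recursive_operate results numbers → Spec_recursive_operate results numbers (recursive_operate results numbers)

-- ===== LEMMAS AND PROOFS =====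
theorem recursive_operate_eq_alt (numbers : List Int) (results : List Int)
    (h : numbers ≠ []) :
    recursive_operate results numbers = recursive_operate_alt results numbers := by
  induction numbers generalizing results with
  | nil => exact absurd rfl h
  | cons y rest ih =>
    have hfun : (fun (acc : List Int) x => acc ++ [x + y] ++ [x * y]) =
        (fun (acc : List Int) x => acc ++ [x + y, x * y]) := by
      funext acc x; simp
    have hstep : results.foldl (fun acc x => acc ++ [x + y] ++ [x * y]) [] =
        results.flatMap (fun x => [x + y, x * y]) := by
      rw [hfun, PySem.List.foldl_append_eq_flatMap]; simp
    cases rest with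
    | nil =>
      simp [recursive_operate, recursive_operate_alt, hstep, List.flatMap_def]
    | cons z zs =>
      have h2 : recursive_operate results (y :: z :: zs) =
          recursive_operate (results.flatMap (fun x => [x + y, x * y])) (z :: zs) := by
        conv_lhs => rw [recursive_operate]
        simp only [hstep, List.length_cons]
        rw [if_pos (by omega)]
      rw [h2, ih _ (by simp)]
      simp [recursive_operate_alt]

-- ===== VERDICT (by name: the statement is the Claim_ definition above) =====
theorem recursive_operate_spec : Claim_equal_recursive_operate := by
  intro results numbers _ hpre
  exact recursive_operate_eq_alt numbers results hpre
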